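-- pv_equiv track=rewrite | github.com/ozrvv/apkch | Crystal Chatbox/routes.py | _vrcx_plus_split_provider_text
-- ===== SOURCE A (Python) =====
-- def _vrcx_plus_split_provider_text(value):
--     text = str(value or "").replace("\r", "\n")
--     tokens = []
--     for line in text.split("\n"):
--         for chunk in line.replace(";", ",").split(","):
--             cleaned = str(chunk or "").strip()
--             if cleaned:
--                 tokens.append(cleaned)
--     return tokens
-- ===== SOURCE B (Python) =====
-- def _vrcx_plus_split_provider_text(value):
--     text = str(value or "")
--     tokens = []
--     cur = []
--     for ch in text + "\n":
--         if ch in "\r\n;,":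
--             cleaned = "".join(cur).strip()
--             if cleaned:
--                 tokens.append(cleaned)
--             cur = []
--         else:
--             cur.append(ch)
--     return tokens
-- ===== Notes on version B (the rewrite author's own statement) =====
-- stated objective: alternative
-- what changed: Replaced A's replace-then-split pipeline (replace \r, split on newline, per line replace ; and split on comma, nested loops) with a single left-to-right character scan that accumulates the current chunk and flushes a stripped token at every delimiter.
import Mathlib
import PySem

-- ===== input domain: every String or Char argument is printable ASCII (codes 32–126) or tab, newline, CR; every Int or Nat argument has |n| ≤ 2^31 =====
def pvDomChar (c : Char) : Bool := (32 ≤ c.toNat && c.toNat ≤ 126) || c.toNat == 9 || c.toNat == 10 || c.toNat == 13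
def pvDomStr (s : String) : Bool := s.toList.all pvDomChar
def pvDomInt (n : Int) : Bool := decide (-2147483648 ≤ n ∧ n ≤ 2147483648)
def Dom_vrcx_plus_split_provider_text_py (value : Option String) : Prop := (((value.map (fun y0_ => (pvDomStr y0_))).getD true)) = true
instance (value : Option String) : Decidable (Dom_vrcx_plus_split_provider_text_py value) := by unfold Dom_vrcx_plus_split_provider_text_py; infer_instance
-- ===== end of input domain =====

-- B replaces A's nested split-on-newline-then-split-on-comma loops by one single-pass
-- character scan over the text that flushes a token at every delimiter (objective: simpler).

-- ===== PORT A =====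
-- `str(value or "")`: None → "", "" (falsy) → "", otherwise the string itself.
def pvValOr (value : Option String) : String :=
  match value with
  | none => ""
  | some v => if v = "" then "" else v

def pvInnerStep (tokens : List String) (chunk : List Char) : List String :=
  let cleaned := PySem.Chars.strip chunk   -- str(chunk or "").strip(): str/or are identities here
  if cleaned ≠ [] then tokens ++ [String.ofList cleaned] else tokens

def pvLineStep (tokens : List String) (line : List Char) : List String :=
  (PySem.Chars.splitOn (PySem.Chars.replace line [';'] [',']) [',']).foldl pvInnerStep tokens

def vrcx_plus_split_provider_text_py (value : Option String) : List String :=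
  (PySem.Chars.splitOn (PySem.Chars.replace (pvValOr value).toList ['\r'] ['\n']) ['\n']).foldl
    pvLineStep []

-- ===== PORT B =====
-- `ch in "\r\n;,"`
def pvDelim (c : Char) : Bool := c == '\r' || c == '\n' || c == ';' || c == ','

-- one step of Source B's loop body: state = (tokens, cur)
def pvAltStep (st : List String × List Char) (c : Char) : List String × List Char :=
  if pvDelim c then
    let cleaned := PySem.Chars.strip st.2
    (if cleaned ≠ [] then st.1 ++ [String.ofList cleaned] else st.1, [])
  else (st.1, st.2 ++ [c])

def vrcx_plus_split_provider_text_py_alt (value : Option String) : List String :=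
  (((pvValOr value).toList ++ ['\n']).foldl pvAltStep ([], [])).1

-- ===== PRECONDITION & SPEC =====
def Spec_vrcx_plus_split_provider_text_py (value : Option String) (out : List String) : Prop := out = vrcx_plus_split_provider_text_py_alt value
instance (value : Option String) (out : List String) : Decidable (Spec_vrcx_plus_split_provider_text_py value out) := by unfold Spec_vrcx_plus_split_provider_text_py; infer_instance

-- ===== CLAIM (what is proved, stated in full; the proofs are below) =====
def Claim_equal_vrcx_plus_split_provider_text_py : Prop := ∀ (value : Option String), Dom_vrcx_plus_split_provider_text_py value → Spec_vrcx_plus_split_provider_text_py value (vrcx_plus_split_provider_text_py value)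

-- ===== LEMMAS AND PROOFS =====

-- proof-only helpers
def pvR2N (c : Char) : Char := if c = '\r' then '\n' else c
def pvS2C (c : Char) : Char := if c = ';' then ',' else c
def pvClean (chunk : List Char) : Option String :=
  let t := PySem.Chars.strip chunk
  if t ≠ [] then some (String.ofList t) else none

-- single-character replace is a map
theorem pv_replace_go (a b : Char) : ∀ (l : List Char) (fuel : Nat) (acc : List Char),
    l.length ≤ fuel →
    PySem.Chars.replace.go [a] [b] fuel l acc
      = acc.reverse ++ l.map (fun c => if c = a then b else c) := by
  intro l
  induction l with
  | nil => intro fuel acc _; cases fuel <;> simp [PySem.Chars.replace.go]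
  | cons ch t ih =>
    intro fuel acc hle
    cases fuel with
    | zero => simp at hle
    | succ f =>
      have hlt : t.length ≤ f := by simpa using hle
      by_cases hca : ch = a
      · subst hca
        have hpre : ([ch].isPrefixOf (ch :: t)) = true := by simp [List.isPrefixOf]
        have step : PySem.Chars.replace.go [ch] [b] (f + 1) (ch :: t) acc
            = PySem.Chars.replace.go [ch] [b] f t (b :: acc) := by
          simp [PySem.Chars.replace.go, hpre]
        rw [step, ih f (b :: acc) hlt]
        simp
      · have hpre : ([a].isPrefixOf (ch :: t)) = false := by
          simp [List.isPrefixOf]; exact fun h => hca h.symm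
        have step : PySem.Chars.replace.go [a] [b] (f + 1) (ch :: t) acc
            = PySem.Chars.replace.go [a] [b] f t (ch :: acc) := by
          simp [PySem.Chars.replace.go, hpre]
        rw [step, ih f (ch :: acc) hlt]
        simp [hca]

theorem pv_replace_eq (a b : Char) (l : List Char) :
    PySem.Chars.replace l [a] [b] = l.map (fun c => if c = a then b else c) := by
  simp [PySem.Chars.replace]
  simpa using pv_replace_go a b l l.length [] le_rfl

theorem pv_replace_r (l : List Char) :
    PySem.Chars.replace l ['\r'] ['\n'] = l.map pvR2N := pv_replace_eq _ _ l

theorem pv_replace_s (l : List Char) :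
    PySem.Chars.replace l [';'] [','] = l.map pvS2C := pv_replace_eq _ _ l

-- single-character splitOn is List.splitOnP
theorem pv_splitOn_go (a : Char) : ∀ (l : List Char) (fuel : Nat) (cur : List Char) (acc : List (List Char)),
    l.length ≤ fuel →
    PySem.Chars.splitOn.go [a] fuel l cur acc
      = acc.reverse ++ (List.splitOnP (· == a) l).modifyHead (cur.reverse ++ ·) := by
  intro l
  induction l with
  | nil => intro fuel cur acc _; cases fuel <;> simp [PySem.Chars.splitOn.go]
  | cons ch t ih =>
    intro fuel cur acc hle
    cases fuel with
    | zero => simp at hle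
    | succ f =>
      have hlt : t.length ≤ f := by simpa using hle
      by_cases hca : ch = a
      · subst hca
        have hpre : ([ch].isPrefixOf (ch :: t)) = true := by simp [List.isPrefixOf]
        have step : PySem.Chars.splitOn.go [ch] (f + 1) (ch :: t) cur acc
            = PySem.Chars.splitOn.go [ch] f t [] (cur.reverse :: acc) := by
          simp [PySem.Chars.splitOn.go, hpre]
        rw [step, ih f [] (cur.reverse :: acc) hlt]
        obtain ⟨x, xs, hx⟩ := List.exists_cons_of_ne_nil (List.splitOnP_ne_nil (· == ch) t)
        simp [List.splitOnP_cons, hx]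
      · have hpre : ([a].isPrefixOf (ch :: t)) = false := by
          simp [List.isPrefixOf]; exact fun h => hca h.symm
        have step : PySem.Chars.splitOn.go [a] (f + 1) (ch :: t) cur acc
            = PySem.Chars.splitOn.go [a] f t (ch :: cur) acc := by
          simp [PySem.Chars.splitOn.go, hpre]
        rw [step, ih f (ch :: cur) acc hlt]
        obtain ⟨x, xs, hx⟩ := List.exists_cons_of_ne_nil (List.splitOnP_ne_nil (· == a) t)
        have hbeq : (ch == a) = false := by simp [hca]
        simp [List.splitOnP_cons, hx, hbeq]

theorem pv_splitOn_eq (a : Char) (l : List Char) :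
    PySem.Chars.splitOn l [a] = List.splitOnP (· == a) l := by
  rw [PySem.Chars.splitOn, pv_splitOn_go a l (l.length + 1) [] [] (by omega)]
  obtain ⟨x, xs, hx⟩ := List.exists_cons_of_ne_nil (List.splitOnP_ne_nil (· == a) l)
  simp [hx]

-- A's inner loop appends the cleaned nonempty chunks
theorem pv_inner_fold (chunks : List (List Char)) : ∀ (toks : List String),
    chunks.foldl pvInnerStep toks = toks ++ chunks.filterMap pvClean := by
  induction chunks with
  | nil => simp
  | cons x xs ih =>
    intro toks
    rw [List.foldl_cons, ih]
    by_cases h : PySem.Chars.strip x ≠ [] <;>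
      simp [pvInnerStep, pvClean, h]

-- A's outer loop flat-maps the lines
theorem pv_outer_fold (lines : List (List Char)) : ∀ (toks : List String),
    lines.foldl pvLineStep toks
      = toks ++ lines.flatMap (fun line =>
          (List.splitOnP (· == ',') (line.map pvS2C)).filterMap pvClean) := by
  induction lines with
  | nil => simp
  | cons x xs ih =>
    intro toks
    rw [List.foldl_cons, ih, pvLineStep, pv_replace_s, pv_splitOn_eq, pv_inner_fold]
    simp

theorem pv_filterMap_flatMap {α β γ : Type} (L : List α) (h : α → List β) (f : β → Option γ) :
    L.flatMap (fun x => (h x).filterMap f) = (L.flatMap h).filterMap f := by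
  induction L with
  | nil => simp
  | cons x xs ih => simp [List.flatMap_cons, List.filterMap_append, ih]

-- splitting on '\n' (after \r→\n) and then on ',' (after ;→,) is one split on all four delimiters
theorem pv_chunks (cs : List Char) :
    ((List.splitOnP (· == '\n') (cs.map pvR2N)).flatMap (fun line => List.splitOnP (· == ',') (line.map pvS2C)))
      = List.splitOnP pvDelim cs := by
  induction cs with
  | nil => simp
  | cons c cs ih =>
    by_cases h1 : c = '\r' ∨ c = '\n'
    · have hr : pvR2N c = '\n' := by rcases h1 with h | h <;> simp [pvR2N, h]
      have hd : pvDelim c = true := by rcases h1 with h | h <;> simp [pvDelim, h]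
      simp only [List.map_cons, hr, List.splitOnP_cons, hd, beq_self_eq_true, if_pos,
        List.flatMap_cons, ih]
      simp
    · have hr : pvR2N c = c := by
        unfold pvR2N; rw [if_neg (fun h => h1 (Or.inl h))]
      have hnn : (c == '\n') = false := beq_eq_false_iff_ne.mpr (fun h => h1 (Or.inr h))
      obtain ⟨x, xs, hx⟩ := List.exists_cons_of_ne_nil
        (List.splitOnP_ne_nil (· == '\n') (cs.map pvR2N))
      by_cases h2 : c = ';' ∨ c = ','
      · have hs : pvS2C c = ',' := by rcases h2 with h | h <;> simp [pvS2C, h]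
        have hd : pvDelim c = true := by rcases h2 with h | h <;> simp [pvDelim, h]
        simp only [List.map_cons, hr, List.splitOnP_cons, hnn, Bool.false_eq_true, if_neg,
          not_false_iff, hx, List.modifyHead_cons, List.flatMap_cons, hs, beq_self_eq_true,
          if_pos, hd]
        rw [← ih, hx]
        simp
      · have hs : pvS2C c = c := by
          unfold pvS2C; rw [if_neg (fun h => h2 (Or.inl h))]
        have hnc : (c == ',') = false := beq_eq_false_iff_ne.mpr (fun h => h2 (Or.inr h))
        have hd : pvDelim c = false := by
          unfold pvDelim
          simp only [Bool.or_eq_false_iff, beq_eq_false_iff_ne]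
          exact ⟨⟨⟨fun h => h1 (Or.inl h), fun h => h1 (Or.inr h)⟩,
            fun h => h2 (Or.inl h)⟩, fun h => h2 (Or.inr h)⟩
        obtain ⟨y, ys, hy⟩ := List.exists_cons_of_ne_nil
          (List.splitOnP_ne_nil (· == ',') (x.map pvS2C))
        have hflat : List.splitOnP pvDelim cs = (y :: ys) ++ xs.flatMap (fun line => List.splitOnP (· == ',') (line.map pvS2C)) := by
          rw [← ih, hx]; simp [hy]
        simp only [List.map_cons, hr, List.splitOnP_cons, hnn, Bool.false_eq_true, if_neg,
          not_false_iff, hx, List.modifyHead_cons, List.flatMap_cons, hs, hnc, hy, hd, hflat]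
        simp

-- B's loop invariant: the scan computes the cleaned nonempty pieces of the one-pass split
theorem pv_alt_fold (cs : List Char) : ∀ (toks : List String) (cur : List Char),
    ((cs ++ ['\n']).foldl pvAltStep (toks, cur)).1
      = toks ++ ((List.splitOnP pvDelim cs).modifyHead (cur ++ ·)).filterMap pvClean := by
  induction cs with
  | nil =>
    intro toks cur
    by_cases h : PySem.Chars.strip cur ≠ [] <;>
      simp [pvAltStep, pvDelim, pvClean, h]
  | cons c cs ih =>
    intro toks cur
    by_cases hd : pvDelim c = true
    · by_cases h : PySem.Chars.strip cur ≠ []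
      · simp only [List.cons_append, List.foldl_cons, pvAltStep, hd, if_pos, if_pos h, ih,
          List.splitOnP_cons]
        obtain ⟨x, xs, hx⟩ := List.exists_cons_of_ne_nil (List.splitOnP_ne_nil pvDelim cs)
        simp [hx, pvClean, h]
      · simp only [List.cons_append, List.foldl_cons, pvAltStep, hd, if_pos, if_neg h, ih,
          List.splitOnP_cons]
        obtain ⟨x, xs, hx⟩ := List.exists_cons_of_ne_nil (List.splitOnP_ne_nil pvDelim cs)
        simp [hx, pvClean, h]
    · simp only [List.cons_append, List.foldl_cons, pvAltStep, hd, Bool.false_eq_true, if_neg,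
        not_false_iff, ih, List.splitOnP_cons]
      obtain ⟨x, xs, hx⟩ := List.exists_cons_of_ne_nil (List.splitOnP_ne_nil pvDelim cs)
      simp [hx]

theorem pv_main (value : Option String) :
    vrcx_plus_split_provider_text_py value = vrcx_plus_split_provider_text_py_alt value := by
  unfold vrcx_plus_split_provider_text_py vrcx_plus_split_provider_text_py_alt
  rw [pv_alt_fold]
  rw [pv_replace_r, pv_splitOn_eq, pv_outer_fold, pv_filterMap_flatMap, pv_chunks]
  obtain ⟨x, xs, hx⟩ := List.exists_cons_of_ne_nil
    (List.splitOnP_ne_nil pvDelim (pvValOr value).toList)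
  simp [hx]

-- ===== VERDICT (by name: the statement is the Claim_ definition above) =====
theorem vrcx_plus_split_provider_text_py_spec : Claim_equal_vrcx_plus_split_provider_text_py := by
  intro value _
  unfold Spec_vrcx_plus_split_provider_text_py
  exact pv_main value
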